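-- pv_equiv track=rewrite | github.com/do0134/crow_study | 영택/4월/0420/1sol.py | solution
-- ===== SOURCE A (Python) =====
-- from collections import deque
--
-- def solution(A, B):
--     a = deque(sorted(A))
--     b = deque(sorted(B))
--     answer = 0
--     while b and a :
--         if a[0] > b[-1] :
--             break
--         elif a[0] < b[0] :
--             answer += 1
--             a.popleft()
--             b.popleft()
--         else :
--             b.popleft()
--     return answer
-- ===== SOURCE B (Python) =====
-- from collections import Counter
--
-- def solution(A, B):
--     ca = Counter(A)
--     cb = Counter(B)
--     pending = 0
--     answer = 0
--     for v in sorted(set(A + B)):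
--         m = min(pending, cb[v])
--         answer += m
--         pending -= m
--         pending += ca[v]
--     return answer
-- ===== Notes on version B (the rewrite author's own statement) =====
-- stated objective: alternative
-- what changed: Replaced the two-deque front-popping greedy (with a break on a[0] > b[-1]) by a single sweep over the sorted distinct values using two Counters, maintaining a running count of not-yet-matched smaller A-elements.
import Mathlib
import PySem

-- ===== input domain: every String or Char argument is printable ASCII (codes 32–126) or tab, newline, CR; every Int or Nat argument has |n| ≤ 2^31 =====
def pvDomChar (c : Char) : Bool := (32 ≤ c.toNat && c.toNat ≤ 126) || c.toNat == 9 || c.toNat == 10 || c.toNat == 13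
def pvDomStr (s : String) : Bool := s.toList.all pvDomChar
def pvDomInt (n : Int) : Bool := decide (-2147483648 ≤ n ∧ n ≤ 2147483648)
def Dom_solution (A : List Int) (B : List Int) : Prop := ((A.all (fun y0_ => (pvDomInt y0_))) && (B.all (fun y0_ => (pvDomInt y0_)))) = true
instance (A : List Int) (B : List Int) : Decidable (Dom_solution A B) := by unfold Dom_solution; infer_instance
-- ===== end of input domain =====

-- B replaces A's two-deque front-popping greedy by a counter-based sweep over the sorted
-- distinct values, keeping a running count of unmatched smaller A-elements (alternative
-- decomposition; same asymptotic cost).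

-- ===== PORT A =====
-- while b and a: if a[0] > b[-1]: break; elif a[0] < b[0]: answer += 1; pop both; else: pop b.
def solGo : List Int → List Int → Int → Int
  | _, [], ans => ans
  | [], _ :: _, ans => ans
  | x :: a', y :: b', ans =>
    if x > (y :: b').getLast (by simp) then ans
    else if x < y then solGo a' b' (ans + 1)
    else solGo (x :: a') b' ans

def solution (A : List Int) (B : List Int) : Int :=
  solGo (PySem.List.sorted A (fun x => x) false) (PySem.List.sorted B (fun x => x) false) 0

-- ===== PORT B =====
def solution_alt (A : List Int) (B : List Int) : Int :=
  let ca := PySem.Dict.counter A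
  let cb := PySem.Dict.counter B
  let vals := PySem.List.sorted (PySem.Set.ofList (A ++ B)) (fun x => x) false
  (vals.foldl (fun (st : Int × Int) v =>
      let m := min st.1 (cb.getD v 0)
      (st.1 - m + ca.getD v 0, st.2 + m)) (0, 0)).2

-- ===== PRECONDITION & SPEC =====
def Spec_solution (A : List Int) (B : List Int) (out : Int) : Prop := out = solution_alt A B
instance (A : List Int) (B : List Int) (out : Int) : Decidable (Spec_solution A B out) := by unfold Spec_solution; infer_instance

-- ===== CLAIM (what is proved, stated in full; the proofs are below) =====
def Claim_equal_solution : Prop := ∀ (A : List Int) (B : List Int), Dom_solution A B → Spec_solution A B (solution A B)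

-- ===== LEMMAS AND PROOFS =====

-- Greedy match count with `p` pending conceptually "-infinity" A-elements in front of `a`.
def G (p : Int) (a b : List Int) : Int :=
  match b with
  | [] => 0
  | y :: b' =>
    if 0 < p then 1 + G (p - 1) a b'
    else match a with
      | [] => 0
      | x :: a' => if x < y then 1 + G p a' b' else G p (x :: a') b'

theorem G_nil (p : Int) (a : List Int) : G p a [] = 0 := rfl

theorem G_cons (p : Int) (a : List Int) (y : Int) (b : List Int) :
    G p a (y :: b) = if 0 < p then 1 + G (p - 1) a b
      else match a with
        | [] => 0
        | x :: a' => if x < y then 1 + G p a' b else G p (x :: a') b := rfl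

theorem G_cons_pos {p : Int} (a : List Int) (y : Int) (b : List Int) (h : 0 < p) :
    G p a (y :: b) = 1 + G (p - 1) a b := by rw [G_cons, if_pos h]

theorem G_cons_nil {p : Int} (y : Int) (b : List Int) (h : ¬ 0 < p) :
    G p [] (y :: b) = 0 := by rw [G_cons, if_neg h]

theorem G_cons_cons {p : Int} (x : Int) (a : List Int) (y : Int) (b : List Int) (h : ¬ 0 < p) :
    G p (x :: a) (y :: b) = if x < y then 1 + G p a b else G p (x :: a) b := by
  rw [G_cons, if_neg h]

theorem G_zero_nil_a (b : List Int) : G 0 [] b = 0 := by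
  cases b with
  | nil => exact G_nil 0 []
  | cons y b => exact G_cons_nil y b (by omega)

-- The value-sweep fold, parametrised by the two count functions.
def F (cA cB : Int → Int) (p : Int) (vs : List Int) : Int :=
  match vs with
  | [] => 0
  | v :: vs' => min p (cB v) + F cA cB (p - min p (cB v) + cA v) vs'

theorem F_congr (cA cB cA' cB' : Int → Int) (vs : List Int) (p : Int)
    (hA : ∀ v ∈ vs, cA v = cA' v) (hB : ∀ v ∈ vs, cB v = cB' v) :
    F cA cB p vs = F cA' cB' p vs := by
  induction vs generalizing p with
  | nil => rfl
  | cons v vs ih =>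
    have hAv := hA v (by simp)
    have hBv := hB v (by simp)
    rw [F, F, hAv, hBv,
      ih _ (fun u hu => hA u (by simp [hu])) (fun u hu => hB u (by simp [hu]))]

-- An element smaller than everything in b acts exactly like one more pending element.
theorem pendShift (b : List Int) (a : List Int) (x : Int) (p : Int)
    (hb : ∀ y ∈ b, x < y) (hp : 0 ≤ p) : G p (x :: a) b = G (p + 1) a b := by
  induction b generalizing p with
  | nil => rw [G_nil, G_nil]
  | cons y b ih =>
    have hxy : x < y := hb y (by simp)
    have hb' : ∀ z ∈ b, x < z := fun z hz => hb z (by simp [hz])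
    by_cases h : 0 < p
    · rw [G_cons_pos _ _ _ h, G_cons_pos _ _ _ (by omega : (0:Int) < p + 1),
        ih (p - 1) hb' (by omega)]
      have e : p - 1 + 1 = p + 1 - 1 := by omega
      rw [e]
    · have hp0 : p = 0 := by omega
      subst hp0
      rw [G_cons_cons _ _ _ _ h, if_pos hxy, G_cons_pos _ _ _ (by omega : (0:Int) < 0 + 1)]
      norm_num

theorem repShift (b' a' : List Int) (v : Int) (hb : ∀ y ∈ b', v < y) :
    ∀ (ca : Nat) (p : Int), 0 ≤ p →
      G p (List.replicate ca v ++ a') b' = G (p + (ca : Int)) a' b' := by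
  intro ca
  induction ca with
  | zero => intro p hp; simp
  | succ n ih =>
    intro p hp
    have e : List.replicate (n + 1) v ++ a' = v :: (List.replicate n v ++ a') := by
      simp [List.replicate_succ]
    rw [e, pendShift b' _ v p hb hp, ih (p + 1) (by omega)]
    congr 1
    push_cast
    ring

-- With no pending elements, a head value that cannot match y just skips y.
theorem skipOne (a : List Int) (y : Int) (b : List Int)
    (ha : ∀ x ∈ a, ¬ x < y) : G 0 a (y :: b) = G 0 a b := by
  cases a with
  | nil => rw [G_zero_nil_a, G_zero_nil_a]
  | cons x a' =>
    have hx : ¬ x < y := ha x (by simp)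
    rw [G_cons_cons _ _ _ _ (by omega : ¬ (0:Int) < 0), if_neg hx]

theorem skipAll (b : List Int) (a : List Int) (x : Int)
    (hb : ∀ y ∈ b, ¬ x < y) : G 0 (x :: a) b = 0 := by
  induction b with
  | nil => exact G_nil 0 _
  | cons y b ih =>
    have hx : ¬ x < y := hb y (by simp)
    rw [G_cons_cons _ _ _ _ (by omega : ¬ (0:Int) < 0), if_neg hx]
    exact ih (fun z hz => hb z (by simp [hz]))

-- Processing one value group: match min(p, cb) pending elements, then the ca copies of v join pending.
theorem groupStep (v : Int) (a' b' : List Int)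
    (ha : ∀ x ∈ a', v < x) (hb : ∀ y ∈ b', v < y) :
    ∀ (cb : Nat) (p : Int), 0 ≤ p → ∀ (ca : Nat),
      G p (List.replicate ca v ++ a') (List.replicate cb v ++ b')
        = min p (cb : Int) + G (p - min p (cb : Int) + (ca : Int)) a' b' := by
  intro cb
  induction cb with
  | zero =>
    intro p hp ca
    simp only [List.replicate, List.nil_append, Nat.cast_zero]
    rw [repShift b' a' v hb ca p hp]
    have h0 : min p (0 : Int) = 0 := by omega
    rw [h0]
    ring_nf
  | succ n ih =>
    intro p hp ca
    have hrep : List.replicate (n + 1) v ++ b' = v :: (List.replicate n v ++ b') := by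
      simp [List.replicate_succ]
    by_cases h : 0 < p
    · rw [hrep, G_cons_pos _ _ _ h, ih (p - 1) (by omega) ca]
      have h1 : min p ((n : Int) + 1) = 1 + min (p - 1) (n : Int) := by omega
      push_cast
      rw [h1]
      have h3 : p - (1 + min (p - 1) (n : Int)) + (ca : Int)
          = p - 1 - min (p - 1) (n : Int) + (ca : Int) := by omega
      rw [h3]
      ring
    · have hp0 : p = 0 := by omega
      subst hp0
      rw [hrep, skipOne _ v _ ?hskip]
      case hskip =>
        intro x hx
        rcases List.mem_append.mp hx with hx | hx
        · have := List.eq_of_mem_replicate hx; omega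
        · have := ha x hx; omega
      rw [ih 0 (by omega) ca]
      have h1 : min (0 : Int) ((n : Int) + 1) = min (0 : Int) (n : Int) := by omega
      push_cast
      rw [h1]

-- A sorted list whose elements are v or come from values > v splits into the v-block and the rest.
theorem decompose (v : Int) (vs : List Int) (hvs : ∀ u ∈ vs, v < u) :
    ∀ (a : List Int), a.Pairwise (· ≤ ·) → (∀ x ∈ a, x = v ∨ x ∈ vs) →
      a = List.replicate (a.count v) v ++ a.filter (fun x => decide (x ≠ v)) := by
  intro a
  induction a with
  | nil => simp
  | cons x a ih =>
    intro hs hm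
    have hsx : ∀ z ∈ a, x ≤ z := fun z hz => List.rel_of_pairwise_cons hs hz
    have hs' : a.Pairwise (· ≤ ·) := hs.tail
    rcases hm x (by simp) with hxe | hxv
    · subst hxe
      have hrec := ih hs' (fun z hz => hm z (by simp [hz]))
      rw [List.count_cons_self]
      simp only [List.replicate_succ, List.cons_append, List.filter_cons]
      simp only [ne_eq, not_true_eq_false, decide_false]
      exact congrArg (x :: ·) hrec
    · have hvx : v < x := hvs x hxv
      have hnotin : v ∉ x :: a := by
        intro hmem
        rcases List.mem_cons.mp hmem with h | h
        · omega
        · have := hsx v h; omega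
      rw [List.count_eq_zero.mpr hnotin]
      simp only [List.replicate, List.nil_append]
      rw [List.filter_eq_self.mpr]
      intro z hz
      simp only [ne_eq, decide_eq_true_eq]
      intro hzv
      exact hnotin (hzv ▸ hz)

-- Main bridge: the value sweep equals the pending-aware greedy.
theorem mainLemma :
    ∀ (vals : List Int), vals.Pairwise (· < ·) →
    ∀ (a b : List Int) (p : Int),
      a.Pairwise (· ≤ ·) → b.Pairwise (· ≤ ·) →
      (∀ x ∈ a, x ∈ vals) → (∀ y ∈ b, y ∈ vals) → 0 ≤ p →
      F (fun v => (a.count v : Int)) (fun v => (b.count v : Int)) p vals = G p a b := by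
  intro vals
  induction vals with
  | nil =>
    intro _ a b p _ _ hma hmb _
    have ha : a = [] := List.eq_nil_iff_forall_not_mem.mpr (fun x hx => by simpa using hma x hx)
    have hb : b = [] := List.eq_nil_iff_forall_not_mem.mpr (fun y hy => by simpa using hmb y hy)
    subst ha; subst hb
    rw [G_nil]; rfl
  | cons v vs ih =>
    intro hvals a b p hsa hsb hma hmb hp
    have hvlt : ∀ u ∈ vs, v < u := fun u hu => List.rel_of_pairwise_cons hvals hu
    have hvals' : vs.Pairwise (· < ·) := hvals.tail
    set a' := a.filter (fun x => decide (x ≠ v)) with ha'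
    set b' := b.filter (fun x => decide (x ≠ v)) with hb'
    have hma' : ∀ x ∈ a', x ∈ vs := by
      intro x hx
      have hxa := List.mem_of_mem_filter hx
      have hxne : x ≠ v := by simpa using List.of_mem_filter hx
      rcases List.mem_cons.mp (hma x hxa) with h | h
      · exact absurd h hxne
      · exact h
    have hmb' : ∀ y ∈ b', y ∈ vs := by
      intro y hy
      have hya := List.mem_of_mem_filter hy
      have hyne : y ≠ v := by simpa using List.of_mem_filter hy
      rcases List.mem_cons.mp (hmb y hya) with h | h
      · exact absurd h hyne
      · exact h
    have hga : ∀ x ∈ a', v < x := fun x hx => hvlt x (hma' x hx)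
    have hgb : ∀ y ∈ b', v < y := fun y hy => hvlt y (hmb' y hy)
    have hsa' : a'.Pairwise (· ≤ ·) := List.Pairwise.filter _ hsa
    have hsb' : b'.Pairwise (· ≤ ·) := List.Pairwise.filter _ hsb
    have hda : a = List.replicate (a.count v) v ++ a' :=
      decompose v vs hvlt a hsa (fun x hx => (List.mem_cons.mp (hma x hx)).imp id id)
    have hdb : b = List.replicate (b.count v) v ++ b' :=
      decompose v vs hvlt b hsb (fun y hy => (List.mem_cons.mp (hmb y hy)).imp id id)
    have hcnta : ∀ u ∈ vs, ((a.count u : Int)) = ((a'.count u : Int)) := by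
      intro u hu
      have hune : u ≠ v := by have := hvlt u hu; omega
      rw [ha', List.count_filter (by simpa using hune)]
    have hcntb : ∀ u ∈ vs, ((b.count u : Int)) = ((b'.count u : Int)) := by
      intro u hu
      have hune : u ≠ v := by have := hvlt u hu; omega
      rw [hb', List.count_filter (by simpa using hune)]
    conv_rhs => rw [hda, hdb]
    rw [groupStep v a' b' hga hgb (b.count v) p hp (a.count v)]
    rw [F]
    have hmin0 : (0:Int) ≤ min p ((b.count v : Int)) := by
      have : (0:Int) ≤ (b.count v : Int) := Int.natCast_nonneg _
      omega
    rw [F_congr _ _ (fun u => ((a'.count u : Int))) (fun u => ((b'.count u : Int))) vs _ hcnta hcntb]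
    rw [ih hvals' a' b' _ hsa' hsb' hma' hmb'
      (by have := min_le_left p ((b.count v : Int)); omega)]

-- Every element of a sorted nonempty list is at most its last element.
theorem le_getLast_sorted : ∀ (b : List Int), b.Pairwise (· ≤ ·) →
    ∀ (h : b ≠ []), ∀ z ∈ b, z ≤ b.getLast h := by
  intro b
  induction b with
  | nil => intro _ h; exact absurd rfl h
  | cons y b ih =>
    intro hs h z hz
    cases b with
    | nil =>
      simp only [List.mem_singleton] at hz
      simp [hz]
    | cons w b' =>
      rw [List.getLast_cons (by simp)]
      rcases List.mem_cons.mp hz with rfl | hz'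
      · have hzw : z ≤ w := List.rel_of_pairwise_cons hs (by simp)
        have hwl : w ≤ (w :: b').getLast (by simp) := ih hs.tail (by simp) w (by simp)
        omega
      · exact ih hs.tail (by simp) z hz'

-- A-side: the ported loop computes G 0 on sorted inputs.
theorem solGo_eq_G : ∀ (b a : List Int) (ans : Int),
    a.Pairwise (· ≤ ·) → b.Pairwise (· ≤ ·) → solGo a b ans = ans + G 0 a b := by
  intro b
  induction b with
  | nil =>
    intro a ans _ _
    rw [G_nil]
    cases a <;> simp [solGo]
  | cons y b' ih =>
    intro a ans hsa hsb
    cases a with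
    | nil => rw [G_zero_nil_a]; simp [solGo]
    | cons x a' =>
      show (if x > (y :: b').getLast (by simp) then ans
        else if x < y then solGo a' b' (ans + 1)
        else solGo (x :: a') b' ans) = ans + G 0 (x :: a') (y :: b')
      by_cases hbrk : x > (y :: b').getLast (by simp)
      · rw [if_pos hbrk, skipAll (y :: b') a' x ?hall]
        · ring
        case hall =>
          intro z hz
          have := le_getLast_sorted (y :: b') hsb (by simp) z hz
          omega
      · rw [if_neg hbrk]
        by_cases hxy : x < y
        · rw [if_pos hxy, ih a' (ans + 1) hsa.tail hsb.tail,
            G_cons_cons _ _ _ _ (by omega : ¬ (0:Int) < 0), if_pos hxy]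
          ring
        · rw [if_neg hxy, ih (x :: a') ans hsa hsb.tail,
            G_cons_cons _ _ _ _ (by omega : ¬ (0:Int) < 0), if_neg hxy]

-- B-side: the fold with a (pending, answer) pair computes F.
theorem foldPair (cA cB : Int → Int) :
    ∀ (vals : List Int) (p ans : Int),
      (vals.foldl (fun (st : Int × Int) v =>
          let m := min st.1 (cB v)
          (st.1 - m + cA v, st.2 + m)) (p, ans)).2 = ans + F cA cB p vals := by
  intro vals
  induction vals with
  | nil => intro p ans; simp [F]
  | cons v vs ih =>
    intro p ans
    simp only [List.foldl_cons]
    rw [ih]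
    rw [F]
    ring

-- ===== VERDICT (by name: the statement is the Claim_ definition above) =====
theorem solution_spec : Claim_equal_solution := by
  intro A B _
  unfold Spec_solution solution solution_alt
  set sa := PySem.List.sorted A (fun x => x) false with hsa_def
  set sb := PySem.List.sorted B (fun x => x) false with hsb_def
  set vals := PySem.List.sorted (PySem.Set.ofList (A ++ B)) (fun x => x) false with hvals_def
  have hsa : sa.Pairwise (· ≤ ·) := by
    have := PySem.List.sorted_pairwise (xs := A) (key := fun x => x)
    simpa using this
  have hsb : sb.Pairwise (· ≤ ·) := by
    have := PySem.List.sorted_pairwise (xs := B) (key := fun x => x)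
    simpa using this
  have hvals : vals.Pairwise (· < ·) := PySem.List.sorted_ofList_pairwise_lt (xs := A ++ B)
  have hmemA : ∀ x ∈ sa, x ∈ vals := by
    intro x hx
    have hxA : x ∈ A := (PySem.List.mem_sorted _ _ _ _).mp hx
    have hxs : x ∈ PySem.Set.ofList (A ++ B) := by
      rw [PySem.Set.mem_ofList]
      exact List.mem_append.mpr (Or.inl hxA)
    exact (PySem.List.mem_sorted _ _ _ _).mpr hxs
  have hmemB : ∀ y ∈ sb, y ∈ vals := by
    intro y hy
    have hyB : y ∈ B := (PySem.List.mem_sorted _ _ _ _).mp hy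
    have hys : y ∈ PySem.Set.ofList (A ++ B) := by
      rw [PySem.Set.mem_ofList]
      exact List.mem_append.mpr (Or.inr hyB)
    exact (PySem.List.mem_sorted _ _ _ _).mpr hys
  rw [foldPair _ _ vals 0 0]
  rw [F_congr _ _ (fun v => ((sa.count v : Int))) (fun v => ((sb.count v : Int))) vals 0 ?hA ?hB]
  case hA =>
    intro v _
    rw [PySem.Dict.getD_counter]
    have : A.count v = sa.count v :=
      ((PySem.List.sorted_perm (xs := A) (key := fun x => x) (rev := false)).count_eq v).symm
    exact_mod_cast congrArg (Int.ofNat) this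
  case hB =>
    intro v _
    rw [PySem.Dict.getD_counter]
    have : B.count v = sb.count v :=
      ((PySem.List.sorted_perm (xs := B) (key := fun x => x) (rev := false)).count_eq v).symm
    exact_mod_cast congrArg (Int.ofNat) this
  rw [mainLemma vals hvals sa sb 0 hsa hsb hmemA hmemB (by omega)]
  rw [solGo_eq_G sb sa 0 hsa hsb]
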